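-- pv_equiv track=rewrite | github.com/JasonSteelmanCoder/1-800-Helper | word_checker.py | find_num_for_word
-- ===== SOURCE A (Python) =====
-- letter_assignments = {
--     '0':[],
--     '1':[],
--     '2':['a', 'b', 'c'],
--     '3':['d', 'e', 'f'],
--     '4':['g', 'h', 'i'],
--     '5':['j', 'k', 'l'],
--     '6':['m', 'n', 'o'],
--     '7':['p', 'q', 'r', 's'],
--     '8':['t', 'u', 'v'],
--     '9':['w', 'x', 'y', 'z']
-- }
--
-- def find_num_for_word(word : str) -> str:
--     letter_list = [letter for letter in word]
--     digit_list = []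
--     for letter in letter_list:
--         for key, value in letter_assignments.items():
--             for num in value:
--                 if num == letter:
--                     digit_list.append(key)
--     phone_num = ''.join(digit_list)
--     return phone_num
-- ===== SOURCE B (Python) =====
-- def find_num_for_word(word: str) -> str:
--     # closed-form phone-pad arithmetic: no letter table at all
--     def digit(ch: str) -> str:
--         i = ord(ch) - 97
--         k = i - (i >= 18) - (i == 25)   # 's' and 'z' sit on 4-letter keys
--         return chr(50 + k // 3)
--     return ''.join(digit(ch) for ch in word if 'a' <= ch <= 'z')
-- ===== Notes on version B (the rewrite author's own statement) =====
-- stated objective: faster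
-- what changed: Replaces the letter-assignment table and its three nested scans entirely with a closed arithmetic formula on the character code (digit = chr(50 + k//3) with k adjusted for the 4-letter keys pqrs and wxyz), applied in one pass over a..z characters.
import Mathlib
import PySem

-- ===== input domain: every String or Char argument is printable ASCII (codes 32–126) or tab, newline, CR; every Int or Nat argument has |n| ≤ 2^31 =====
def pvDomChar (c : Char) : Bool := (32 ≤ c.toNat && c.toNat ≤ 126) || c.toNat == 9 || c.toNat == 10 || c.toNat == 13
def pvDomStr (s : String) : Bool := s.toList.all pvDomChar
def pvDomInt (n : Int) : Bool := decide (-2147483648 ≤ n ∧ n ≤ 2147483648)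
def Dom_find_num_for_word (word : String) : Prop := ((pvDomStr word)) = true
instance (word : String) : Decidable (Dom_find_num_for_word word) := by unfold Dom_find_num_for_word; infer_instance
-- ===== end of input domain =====

-- B drops the letter table entirely and computes each digit by a closed arithmetic
-- formula on the character code (objective: alternative algorithm, no table).

-- ===== PORT A =====
-- the module-level dict letter_assignments (insertion order)
def letter_assignments : List (String × List Char) :=
  [("0", []), ("1", []),
   ("2", ['a', 'b', 'c']), ("3", ['d', 'e', 'f']), ("4", ['g', 'h', 'i']),
   ("5", ['j', 'k', 'l']), ("6", ['m', 'n', 'o']), ("7", ['p', 'q', 'r', 's']),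
   ("8", ['t', 'u', 'v']), ("9", ['w', 'x', 'y', 'z'])]

def find_num_for_word (word : String) : String :=
  let letter_list := word.toList
  let digit_list : List String :=
    letter_list.foldl (fun acc letter =>
      letter_assignments.foldl (fun acc kv =>
        kv.2.foldl (fun acc num => if num == letter then acc ++ [kv.1] else acc) acc) acc) []
  PySem.Str.join "" digit_list

-- ===== PORT B =====
-- Source B's helper digit(ch): pure code arithmetic, no table
def pvDigit (c : Char) : String :=
  let i : Nat := c.toNat - 97
  let k : Nat := i - (if 18 ≤ i then 1 else 0) - (if i = 25 then 1 else 0)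
  String.mk [Char.ofNat (50 + k / 3)]

def find_num_for_word_alt (word : String) : String :=
  PySem.Str.join ""
    ((word.toList.filter (fun c => decide ('a' ≤ c) && decide (c ≤ 'z'))).map pvDigit)

-- ===== PRECONDITION & SPEC =====
def Spec_find_num_for_word (word : String) (out : String) : Prop := out = find_num_for_word_alt word
instance (word : String) (out : String) : Decidable (Spec_find_num_for_word word out) := by unfold Spec_find_num_for_word; infer_instance

-- ===== CLAIM =====
def Claim_equal_find_num_for_word : Prop := ∀ (word : String), Dom_find_num_for_word word → Spec_find_num_for_word word (find_num_for_word word)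

-- ===== LEMMAS AND PROOFS =====

-- A's per-character contribution: what the two inner loops append for one letter
def pvContrib (letter : Char) : List String :=
  letter_assignments.foldl (fun acc kv =>
    kv.2.foldl (fun acc num => if num == letter then acc ++ [kv.1] else acc) acc) []

-- A's inner double loop only appends: it maps acc to acc ++ pvContrib letter
lemma contrib_append (acc : List String) (letter : Char) :
    letter_assignments.foldl (fun acc kv =>
      kv.2.foldl (fun acc num => if num == letter then acc ++ [kv.1] else acc) acc) acc
    = acc ++ pvContrib letter := by
  simp only [pvContrib, PySem.List.foldl_append_if, PySem.List.foldl_append_eq_flatMap,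
    List.nil_append]

-- per character, A's appended key list equals B's arithmetic digit (or nothing)
lemma contrib_eq (c : Char) :
    pvContrib c = if (decide ('a' ≤ c) && decide (c ≤ 'z')) = true then [pvDigit c] else [] := by
  by_cases ha : c = 'a'; · subst ha; decide
  by_cases hb : c = 'b'; · subst hb; decide
  by_cases hc : c = 'c'; · subst hc; decide
  by_cases hd : c = 'd'; · subst hd; decide
  by_cases he : c = 'e'; · subst he; decide
  by_cases hf : c = 'f'; · subst hf; decide
  by_cases hg : c = 'g'; · subst hg; decide
  by_cases hh : c = 'h'; · subst hh; decide
  by_cases hi : c = 'i'; · subst hi; decide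
  by_cases hj : c = 'j'; · subst hj; decide
  by_cases hk : c = 'k'; · subst hk; decide
  by_cases hl : c = 'l'; · subst hl; decide
  by_cases hm : c = 'm'; · subst hm; decide
  by_cases hn : c = 'n'; · subst hn; decide
  by_cases ho : c = 'o'; · subst ho; decide
  by_cases hp : c = 'p'; · subst hp; decide
  by_cases hq : c = 'q'; · subst hq; decide
  by_cases hr : c = 'r'; · subst hr; decide
  by_cases hs : c = 's'; · subst hs; decide
  by_cases ht : c = 't'; · subst ht; decide
  by_cases hu : c = 'u'; · subst hu; decide
  by_cases hv : c = 'v'; · subst hv; decide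
  by_cases hw : c = 'w'; · subst hw; decide
  by_cases hx : c = 'x'; · subst hx; decide
  by_cases hy : c = 'y'; · subst hy; decide
  by_cases hz : c = 'z'; · subst hz; decide
  -- c is not a lowercase letter: both sides are empty
  have hout : (decide ('a' ≤ c) && decide (c ≤ 'z')) = false := by
    by_contra h
    have h' : 'a' ≤ c ∧ c ≤ 'z' := by
      rcases Bool.not_eq_false _ |>.mp h |> Bool.and_eq_true_iff.mp with ⟨h1, h2⟩
      exact ⟨of_decide_eq_true h1, of_decide_eq_true h2⟩
    have h97 : 97 ≤ c.toNat := h'.1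
    have h122 : c.toNat ≤ 122 := h'.2
    have hco : Char.ofNat c.toNat = c := Char.ofNat_toNat c
    interval_cases hcn : c.toNat <;>
      first
      | exact ha hco.symm
      | exact hb hco.symm
      | exact hc hco.symm
      | exact hd hco.symm
      | exact he hco.symm
      | exact hf hco.symm
      | exact hg hco.symm
      | exact hh hco.symm
      | exact hi hco.symm
      | exact hj hco.symm
      | exact hk hco.symm
      | exact hl hco.symm
      | exact hm hco.symm
      | exact hn hco.symm
      | exact ho hco.symm
      | exact hp hco.symm
      | exact hq hco.symm
      | exact hr hco.symm
      | exact hs hco.symm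
      | exact ht hco.symm
      | exact hu hco.symm
      | exact hv hco.symm
      | exact hw hco.symm
      | exact hx hco.symm
      | exact hy hco.symm
      | exact hz hco.symm
  rw [hout]
  simp [pvContrib, letter_assignments, List.foldl, Ne.symm ha, Ne.symm hb, Ne.symm hc, Ne.symm hd, Ne.symm he, Ne.symm hf, Ne.symm hg, Ne.symm hh, Ne.symm hi, Ne.symm hj, Ne.symm hk, Ne.symm hl, Ne.symm hm, Ne.symm hn, Ne.symm ho, Ne.symm hp, Ne.symm hq, Ne.symm hr, Ne.symm hs, Ne.symm ht, Ne.symm hu, Ne.symm hv, Ne.symm hw, Ne.symm hx, Ne.symm hy, Ne.symm hz]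

-- accumulated: A's digit list over any char list is B's filter-then-map list
lemma flatMap_contrib (l : List Char) :
    l.flatMap pvContrib = (l.filter (fun c => decide ('a' ≤ c) && decide (c ≤ 'z'))).map pvDigit := by
  induction l with
  | nil => rfl
  | cons c l ih =>
    rw [List.flatMap_cons, ih, List.filter_cons]
    rcases h : (decide ('a' ≤ c) && decide (c ≤ 'z')) with _ | _ <;>
      simp [contrib_eq c, h]

-- ===== VERDICT =====
theorem find_num_for_word_spec : Claim_equal_find_num_for_word := by
  intro word _
  unfold Spec_find_num_for_word find_num_for_word find_num_for_word_alt
  simp only [contrib_append]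
  rw [PySem.List.foldl_append_eq_flatMap]
  simp only [List.nil_append]
  rw [flatMap_contrib]
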